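-- pv_equiv track=rewrite | github.com/ZhikuoChen/HMM | HMM_fenci.py | printResult
-- ===== SOURCE A (Python) =====
-- def printResult(sen,state):
--     wordList=[]
--     string=''  #定义一个空字符串
--     for i in range(len(state)):
--         if state[i]=='B' or state[i]=='M':
--              string=string+sen[i]
--         else:
--             string=string+sen[i]
--             wordList.append(string)
--             string=''
--     return wordList
-- ===== SOURCE B (Python) =====
-- def printResult(sen, state):
--     # boundary-first decomposition: find word-end indices, then assemble each word
--     ends = [i for i, s in enumerate(state) if s != 'B' and s != 'M']
--     wordList = []
--     start = 0
--     for end in ends: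
--         wordList.append(''.join(sen[k] for k in range(start, end + 1)))
--         start = end + 1
--     return wordList
-- ===== Notes on version B (the rewrite author's own statement) =====
-- stated objective: alternative
-- what changed: A accumulates characters and flushes the buffer at each non-B/M tag in one pass; B first computes the list of word-end indices from the state tags, then assembles each word from its index range with ''.join, walking a start pointer.
import Mathlib
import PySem

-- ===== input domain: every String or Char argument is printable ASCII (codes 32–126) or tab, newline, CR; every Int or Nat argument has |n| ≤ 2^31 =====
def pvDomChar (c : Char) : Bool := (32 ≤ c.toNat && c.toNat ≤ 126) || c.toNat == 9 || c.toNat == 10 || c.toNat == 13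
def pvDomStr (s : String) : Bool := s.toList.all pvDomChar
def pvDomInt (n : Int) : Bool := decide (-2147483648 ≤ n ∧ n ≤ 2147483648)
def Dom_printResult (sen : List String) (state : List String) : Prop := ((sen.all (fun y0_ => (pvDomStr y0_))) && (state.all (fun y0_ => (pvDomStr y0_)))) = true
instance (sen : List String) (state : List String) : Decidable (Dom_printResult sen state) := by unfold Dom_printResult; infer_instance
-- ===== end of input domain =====

-- B replaces A's accumulate-and-flush single pass by a boundary-first decomposition
-- (collect word-end indices, then assemble each word from its index range); objective: alternative, same cost.

-- ===== PORT A =====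
def printResult (sen : List String) (state : List String) : List String :=
  ((PySem.List.pyRange 0 (PySem.List.len state)).foldl
      (fun (acc : List String × String) i =>
        if PySem.List.pyGetD state i "" == "B" || PySem.List.pyGetD state i "" == "M" then
          (acc.1, acc.2 ++ PySem.List.pyGetD sen i "")
        else
          (acc.1 ++ [acc.2 ++ PySem.List.pyGetD sen i ""], ""))
      ([], "")).1

-- ===== PORT B =====
def printResult_alt (sen : List String) (state : List String) : List String :=
  let ends := (PySem.List.enumerate state).filterMap
      (fun p => if p.2 != "B" && p.2 != "M" then some p.1 else none)
  (ends.foldl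
      (fun (acc : List String × Int) e =>
        (acc.1 ++ [PySem.Str.join "" ((PySem.List.pyRange acc.2 (e + 1)).map
            (fun k => PySem.List.pyGetD sen k ""))], e + 1))
      ([], 0)).1

-- ===== PRECONDITION & SPEC =====
-- Pre_ excludes exactly the inputs where Python A raises IndexError: some scanned
-- index of state has no counterpart in sen, i.e. len(state) > len(sen).
def Pre_printResult (sen : List String) (state : List String) : Prop :=
  state.length ≤ sen.length
instance (sen : List String) (state : List String) : Decidable (Pre_printResult sen state) := by unfold Pre_printResult; infer_instance

def pvWitness_printResult : List String × List String :=
  (["a", "b", "c", "d"], ["B", "M", "E", "S"])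

def Spec_printResult (sen : List String) (state : List String) (out : List String) : Prop := out = printResult_alt sen state
instance (sen : List String) (state : List String) (out : List String) : Decidable (Spec_printResult sen state out) := by unfold Spec_printResult; infer_instance

-- ===== CLAIM (what is proved, stated in full; the proofs are below) =====
def Claim_equal_printResult : Prop := ∀ (sen : List String) (state : List String), Dom_printResult sen state → Pre_printResult sen state → Spec_printResult sen state (printResult sen state)

-- ===== LEMMAS AND PROOFS =====

-- Common characterisation: the word list as a structural recursion over `state`,
-- reading `sen` positionally (missing positions read as "" — both ports pad with pyGetD ""'s default).
def segWords (sen : List String) (state : List String) (acc : String) : List String :=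
  match state with
  | [] => []
  | st :: sts =>
    if st == "B" || st == "M" then segWords sen.tail sts (acc ++ sen.headD "")
    else (acc ++ sen.headD "") :: segWords sen.tail sts ""

theorem join_empty_chars (xs : List (List Char)) (x : List Char) :
    PySem.Chars.join [] (xs ++ [x]) = PySem.Chars.join [] xs ++ x := by
  induction xs with
  | nil => simp [PySem.Chars.join_singleton, PySem.Chars.join_nil]
  | cons a t ih =>
    cases t with
    | nil => simp [PySem.Chars.join_singleton, PySem.Chars.join_cons_cons]
    | cons b r =>
      simp only [List.cons_append] at ih ⊢
      rw [PySem.Chars.join_cons_cons, PySem.Chars.join_cons_cons, ih]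
      simp

theorem join_empty_snoc (xs : List String) (x : String) :
    PySem.Str.join "" (xs ++ [x]) = PySem.Str.join "" xs ++ x := by
  simp only [PySem.Str.join, List.map_append, List.map_cons, List.map_nil]
  rw [show ("" : String).toList = [] from rfl, join_empty_chars, String.ofList_append,
    String.ofList_toList]

-- headD of a drop is getD
theorem headD_drop (l : List String) (j : Nat) (d : String) :
    (l.drop j).headD d = l.getD j d := by
  rw [List.headD_eq_head?_getD, List.head?_drop, List.getD_eq_getElem?_getD]

-- the word sen[a:b] assembled by B
def joinR (sen : List String) (a b : Int) : String :=
  PySem.Str.join "" ((PySem.List.pyRange a b).map (fun k => PySem.List.pyGetD sen k ""))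

theorem joinR_self (sen : List String) (a : Int) : joinR sen a a = "" := by
  simp [joinR, PySem.List.pyRange, PySem.Str.join, PySem.Chars.join_nil]

theorem joinR_snoc (sen : List String) (a b : Int) (h : a ≤ b) :
    joinR sen a (b + 1) = joinR sen a b ++ PySem.List.pyGetD sen b "" := by
  rw [joinR, PySem.List.pyRange_one_succ_right h, List.map_append, List.map_cons, List.map_nil,
    join_empty_snoc]
  rfl

-- A's loop over the index suffix [j, len) computes segWords of the list suffixes
theorem A_loop (sen state : List String) (k : Nat) :
    ∀ (j : Nat), state.length = j + k → ∀ (ws : List String) (acc : String),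
    ((PySem.List.pyRange (j : Int) (state.length : Int)).foldl
      (fun (acc : List String × String) i =>
        if PySem.List.pyGetD state i "" == "B" || PySem.List.pyGetD state i "" == "M" then
          (acc.1, acc.2 ++ PySem.List.pyGetD sen i "")
        else
          (acc.1 ++ [acc.2 ++ PySem.List.pyGetD sen i ""], ""))
      (ws, acc)).1 = ws ++ segWords (sen.drop j) (state.drop j) acc := by
  induction k with
  | zero =>
    intro j hj ws acc
    have : (j : Int) = (state.length : Int) := by omega
    rw [this]
    simp [PySem.List.pyRange, List.drop_of_length_le (by omega : state.length ≤ j), segWords]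
  | succ k ih =>
    intro j hj ws acc
    have hjlt : j < state.length := by omega
    rw [PySem.List.pyRange_one_cons (by exact_mod_cast hjlt), List.foldl_cons]
    have hst : PySem.List.pyGetD state (j : Int) "" = state[j] := by
      rw [PySem.List.pyGetD_natCast, List.getD_eq_getElem?_getD, List.getElem?_eq_getElem hjlt]
      rfl
    have hsen : PySem.List.pyGetD sen (j : Int) "" = (sen.drop j).headD "" := by
      rw [PySem.List.pyGetD_natCast, headD_drop]
    have hdrop : state.drop j = state[j] :: state.drop (j + 1) := List.drop_eq_getElem_cons hjlt
    have htail : (sen.drop j).tail = sen.drop (j + 1) := by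
      rw [← List.drop_drop]; simp
    have hcast : (j : Int) + 1 = ((j + 1 : Nat) : Int) := by push_cast; ring
    rw [hst, hsen, hdrop, segWords]
    by_cases hB : state[j] == "B" || state[j] == "M"
    · simp only [hB, if_pos]
      rw [hcast, ih (j + 1) (by omega)]
      rw [htail]
    · simp only [hB, Bool.false_eq_true, if_false]
      rw [hcast, ih (j + 1) (by omega)]
      rw [htail, List.append_assoc, List.singleton_append]

-- B's loop over the remaining boundary indices computes segWords with the pending word joinR
theorem B_loop (sen state : List String) (k : Nat) :
    ∀ (j : Nat), state.length = j + k → ∀ (start : Nat), start ≤ j → ∀ (ws : List String),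
    (((PySem.List.enumerate (state.drop j) (j : Int)).filterMap
        (fun p => if p.2 != "B" && p.2 != "M" then some p.1 else none)).foldl
      (fun (acc : List String × Int) e =>
        (acc.1 ++ [PySem.Str.join "" ((PySem.List.pyRange acc.2 (e + 1)).map
            (fun k => PySem.List.pyGetD sen k ""))], e + 1))
      (ws, (start : Int))).1
    = ws ++ segWords (sen.drop j) (state.drop j) (joinR sen (start : Int) (j : Int)) := by
  induction k with
  | zero =>
    intro j hj start hs ws
    rw [List.drop_of_length_le (by omega : state.length ≤ j)]
    simp [PySem.List.enumerate, segWords]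
  | succ k ih =>
    intro j hj start hs ws
    have hjlt : j < state.length := by omega
    have hdrop : state.drop j = state[j] :: state.drop (j + 1) := List.drop_eq_getElem_cons hjlt
    have hsen : (sen.drop j).headD "" = PySem.List.pyGetD sen (j : Int) "" := by
      rw [PySem.List.pyGetD_natCast, headD_drop]
    have htail : (sen.drop j).tail = sen.drop (j + 1) := by
      rw [← List.drop_drop]; simp
    have hcast : (j : Int) + 1 = ((j + 1 : Nat) : Int) := by push_cast; ring
    rw [hdrop, show PySem.List.enumerate (state[j] :: state.drop (j+1)) (j : Int)
        = ((j : Int), state[j]) :: PySem.List.enumerate (state.drop (j+1)) ((j : Int) + 1) by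
      simp [PySem.List.enumerate]]
    rw [List.filterMap_cons]
    by_cases hB : state[j] == "B" || state[j] == "M"
    · have hpred : (state[j] != "B" && state[j] != "M") = false := by
        cases h1 : state[j] == "B" <;> cases h2 : state[j] == "M" <;>
          simp_all [bne]
      simp only [hpred, Bool.false_eq_true, if_false]
      rw [hcast, ih (j + 1) (by omega) start (by omega) ws, segWords]
      simp only [hB, if_pos]
      have hacc : joinR sen (start : Int) ((j + 1 : Nat) : Int)
          = joinR sen (start : Int) (j : Int) ++ PySem.List.pyGetD sen (j : Int) "" := by
        rw [← hcast]; exact joinR_snoc sen _ _ (by exact_mod_cast hs)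
      rw [htail, hsen, hacc]
    · have hpred : (state[j] != "B" && state[j] != "M") = true := by
        cases h1 : state[j] == "B" <;> cases h2 : state[j] == "M" <;>
          simp_all [bne]
      simp only [hpred, if_pos]
      rw [List.foldl_cons]
      rw [hcast, ih (j + 1) (by omega) (j + 1) (by omega) _, segWords]
      simp only [hB, Bool.false_eq_true, if_false]
      have hacc : joinR sen (start : Int) ((j + 1 : Nat) : Int)
          = joinR sen (start : Int) (j : Int) ++ PySem.List.pyGetD sen (j : Int) "" := by
        rw [← hcast]; exact joinR_snoc sen _ _ (by exact_mod_cast hs)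
      rw [htail, hsen, joinR_self,
        show (PySem.Str.join "" ((PySem.List.pyRange ((start : Nat) : Int) ((j + 1 : Nat) : Int)).map
            (fun k => PySem.List.pyGetD sen k ""))) = joinR sen (start : Int) ((j + 1 : Nat) : Int) from rfl,
        hacc, List.append_assoc, List.singleton_append]

-- ===== VERDICT (by name: the statement is the Claim_ definition above) =====
theorem printResult_spec : Claim_equal_printResult := by
  intro sen state _ _
  unfold Spec_printResult printResult printResult_alt
  rw [show PySem.List.len state = (state.length : Int) from rfl]
  rw [show (0 : Int) = ((0 : Nat) : Int) from rfl]
  rw [A_loop sen state state.length 0 (by omega) [] ""]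
  have := B_loop sen state state.length 0 (by omega) 0 (by omega) []
  simp only [Nat.cast_zero, List.drop_zero] at this ⊢
  rw [this, joinR_self]
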